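-- pv_equiv track=rewrite | github.com/GSstarGamer/Phantom-Calculator | main.py | rankForgun
-- ===== SOURCE A (Python) =====
-- import math
--
-- def roundNum(number, place):
--     return int(math.ceil(number / place)) * place
--
-- def nextReward(rank):
--     return (rank*5)+200
--
-- def rankCredit(rank):
--     credits = 0
--     for i in range(rank):
--         credits += nextReward(i)
--     return credits
--
-- def reducedPrice(gunRank, currentRank):
--     return 140*(gunRank - currentRank) + 700
--
-- def rankForgun(gunRank):  # No credits must be used inorder to get the gun
--
--     possible = []
--     for rank in range(300):
--         if roundNum(rankCredit(rank), 1000) == roundNum(reducedPrice(gunRank, rank), 1000):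
--             possible.append(
--                 [rankCredit(rank), reducedPrice(gunRank, rank), rank])
--
--     for poss in possible:
--         if poss[0] >= poss[1]:
--             return [poss[2], poss[1]]
-- ===== SOURCE B (Python) =====
-- def rankForgun(gunRank):
--     # closed-form credit sum + single pass with early return
--     for rank in range(300):
--         credit = 5 * (rank - 1) * rank // 2 + 200 * rank
--         price = 140 * (gunRank - rank) + 700
--         if -(-credit // 1000) == -(-price // 1000) and credit >= price:
--             return [rank, price]
--     return None
-- ===== Notes on version B (the rewrite author's own statement) =====
-- stated objective: simpler
-- what changed: B replaces the per-rank summation loop (rankCredit re-summed O(rank) three times per rank) with the closed form 5*(rank-1)*rank//2 + 200*rank and fuses the two phases (collect matching ranks, then scan them) into one early-returning pass.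
import Mathlib
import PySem

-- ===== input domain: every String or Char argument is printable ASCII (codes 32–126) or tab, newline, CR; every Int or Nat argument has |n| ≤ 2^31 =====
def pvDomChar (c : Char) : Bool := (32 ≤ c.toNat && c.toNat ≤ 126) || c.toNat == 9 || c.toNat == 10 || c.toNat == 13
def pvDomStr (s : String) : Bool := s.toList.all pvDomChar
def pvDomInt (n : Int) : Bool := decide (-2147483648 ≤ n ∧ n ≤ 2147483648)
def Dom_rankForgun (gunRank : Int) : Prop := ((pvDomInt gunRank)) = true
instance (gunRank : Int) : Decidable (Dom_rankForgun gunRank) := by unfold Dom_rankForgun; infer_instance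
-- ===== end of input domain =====

-- B replaces A's per-rank summation loop by the closed form 5*(rank-1)*rank//2 + 200*rank and
-- fuses A's two phases (collect matches, then scan them) into one early-returning pass: simpler and faster.

-- ===== PORT A =====
-- int(math.ceil(number / place)) * place: ported as exact integer ceiling division -((-n)//place)*place,
-- which is exact here (place = 1000 and |number| ≤ ~3·10^11, well within double precision, so the float
-- ceil equals the integer ceiling on every admitted input).
def roundNumA (number place : Int) : Int := (-(PySem.Int.floordiv (-number) place)) * place

def nextRewardA (rank : Int) : Int := rank * 5 + 200

def rankCreditA (rank : Int) : Int :=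
  (PySem.List.pyRange 0 rank 1).foldl (fun credits i => credits + nextRewardA i) 0

def reducedPriceA (gunRank currentRank : Int) : Int := 140 * (gunRank - currentRank) + 700

-- the second loop of A; poss always has length 3, so indices 0/1/2 are in range and pyGetD is exact
def findPossA : List (List Int) → Option (List Int)
  | [] => none
  | poss :: rest =>
    if PySem.List.pyGetD poss 0 0 ≥ PySem.List.pyGetD poss 1 0 then
      some [PySem.List.pyGetD poss 2 0, PySem.List.pyGetD poss 1 0]
    else findPossA rest

def rankForgun (gunRank : Int) : Option (List Int) :=
  let possible := (PySem.List.pyRange 0 300 1).foldl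
    (fun acc rank =>
      if roundNumA (rankCreditA rank) 1000 = roundNumA (reducedPriceA gunRank rank) 1000 then
        acc ++ [[rankCreditA rank, reducedPriceA gunRank rank, rank]]
      else acc) []
  findPossA possible

-- ===== PORT B =====
def altLoop (gunRank : Int) : List Int → Option (List Int)
  | [] => none
  | rank :: rest =>
    let credit := PySem.Int.floordiv (5 * (rank - 1) * rank) 2 + 200 * rank
    let price := 140 * (gunRank - rank) + 700
    if -(PySem.Int.floordiv (-credit) 1000) = -(PySem.Int.floordiv (-price) 1000) ∧ credit ≥ price then
      some [rank, price]
    else altLoop gunRank rest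

def rankForgun_alt (gunRank : Int) : Option (List Int) :=
  altLoop gunRank (PySem.List.pyRange 0 300 1)

-- ===== PRECONDITION & SPEC =====
def Spec_rankForgun (gunRank : Int) (out : Option (List Int)) : Prop := out = rankForgun_alt gunRank
instance (gunRank : Int) (out : Option (List Int)) : Decidable (Spec_rankForgun gunRank out) := by unfold Spec_rankForgun; infer_instance

-- ===== CLAIM (what is proved, stated in full; the proofs are below) =====
def Claim_equal_rankForgun : Prop := ∀ (gunRank : Int), Dom_rankForgun gunRank → Spec_rankForgun gunRank (rankForgun gunRank)

-- ===== LEMMAS AND PROOFS =====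

-- twice A's summed credit, in closed form (no division)
theorem two_mul_rankCreditA (n : Nat) :
    2 * rankCreditA (n : Int) = 5 * ((n : Int) - 1) * n + 400 * n := by
  induction n with
  | zero => simp [rankCreditA]
  | succ m ih =>
    have hsplit : PySem.List.pyRange 0 ((m : Int) + 1) 1
        = PySem.List.pyRange 0 (m : Int) 1 ++ [(m : Int)] :=
      PySem.List.pyRange_one_succ_right (by exact_mod_cast Nat.zero_le m)
    have : rankCreditA ((m : Int) + 1) = rankCreditA (m : Int) + ((m : Int) * 5 + 200) := by
      simp [rankCreditA, hsplit, List.foldl_append, nextRewardA]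
    push_cast
    rw [this]
    linear_combination ih

theorem rankCreditA_closed (r : Int) (hr : 0 ≤ r) :
    rankCreditA r = PySem.Int.floordiv (5 * (r - 1) * r) 2 + 200 * r := by
  obtain ⟨n, rfl⟩ := Int.eq_ofNat_of_zero_le hr
  have h2 := two_mul_rankCreditA n
  have hform : 5 * ((n : Int) - 1) * n = 2 * (rankCreditA (n : Int) - 200 * n) := by
    linear_combination -h2
  rw [hform, PySem.Int.floordiv_eq_ediv_of_pos (by norm_num : (0:Int) < 2),
    Int.mul_ediv_cancel_left _ (by norm_num : (2 : Int) ≠ 0)]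
  ring

-- scanning an appended list
theorem findPossA_append (l1 l2 : List (List Int)) :
    findPossA (l1 ++ l2) = (findPossA l1).orElse (fun _ => findPossA l2) := by
  induction l1 with
  | nil => simp [findPossA, Option.orElse]
  | cons poss rest ih =>
    by_cases h : PySem.List.pyGetD poss 0 0 ≥ PySem.List.pyGetD poss 1 0 <;>
      simp [findPossA, h, ih, Option.orElse]

-- one unfolding step of B's loop
theorem altLoop_cons (g r : Int) (rs : List Int) :
    altLoop g (r :: rs) =
      (if -(PySem.Int.floordiv (-(PySem.Int.floordiv (5 * (r - 1) * r) 2 + 200 * r)) 1000)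
            = -(PySem.Int.floordiv (-(140 * (g - r) + 700)) 1000)
          ∧ PySem.Int.floordiv (5 * (r - 1) * r) 2 + 200 * r ≥ 140 * (g - r) + 700 then
        some [r, 140 * (g - r) + 700]
      else altLoop g rs) := rfl

-- building then scanning on A's side equals B's single fused pass
theorem fuse (g : Int) (l : List Int) (hl : ∀ r ∈ l, 0 ≤ r) (acc : List (List Int)) :
    findPossA (l.foldl
      (fun acc rank =>
        if roundNumA (rankCreditA rank) 1000 = roundNumA (reducedPriceA g rank) 1000 then
          acc ++ [[rankCreditA rank, reducedPriceA g rank, rank]]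
        else acc) acc)
      = (findPossA acc).orElse (fun _ => altLoop g l) := by
  induction l generalizing acc with
  | nil => cases h : findPossA acc <;> simp [altLoop, Option.orElse, h]
  | cons r rs ih =>
    have hr : 0 ≤ r := hl r (List.mem_cons_self ..)
    have hrs : ∀ x ∈ rs, 0 ≤ x := fun x hx => hl x (List.mem_cons_of_mem _ hx)
    have hcred := rankCreditA_closed r hr
    -- the rounded-equality tests of A and B agree
    have hcond : (roundNumA (rankCreditA r) 1000 = roundNumA (reducedPriceA g r) 1000)
        ↔ (-(PySem.Int.floordiv (-(PySem.Int.floordiv (5 * (r - 1) * r) 2 + 200 * r)) 1000)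
            = -(PySem.Int.floordiv (-(140 * (g - r) + 700)) 1000)) := by
      rw [← hcred]
      unfold roundNumA reducedPriceA
      constructor
      · intro h
        have := mul_right_cancel₀ (by norm_num : (1000 : Int) ≠ 0) h
        omega
      · intro h; omega
    simp only [List.foldl_cons]
    rw [ih hrs]
    by_cases hA : roundNumA (rankCreditA r) 1000 = roundNumA (reducedPriceA g r) 1000
    · rw [if_pos hA, findPossA_append]
      have hB := hcond.mp hA
      by_cases hge : rankCreditA r ≥ reducedPriceA g r
      · have : findPossA [[rankCreditA r, reducedPriceA g r, r]] = some [r, reducedPriceA g r] := by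
          simp [findPossA, hge, PySem.List.pyGetD]
        rw [this]
        have hB' : altLoop g (r :: rs) = some [r, 140 * (g - r) + 700] := by
          rw [altLoop_cons, if_pos ⟨hB, by unfold reducedPriceA at hge; omega⟩]
        rw [hB']
        cases h : findPossA acc <;> simp [Option.orElse, reducedPriceA]
      · have : findPossA [[rankCreditA r, reducedPriceA g r, r]] = none := by
          simp [findPossA, PySem.List.pyGetD]
          omega
        rw [this]
        have hB' : altLoop g (r :: rs) = altLoop g rs := by
          rw [altLoop_cons, if_neg (by
            rintro ⟨-, hge'⟩
            exact hge (by unfold reducedPriceA; omega))]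
        rw [hB']
        cases h : findPossA acc <;> simp [Option.orElse]
    · rw [if_neg hA]
      have hB' : altLoop g (r :: rs) = altLoop g rs := by
        rw [altLoop_cons, if_neg (by rintro ⟨hB, -⟩; exact hA (hcond.mpr hB))]
      rw [hB']

-- ===== VERDICT (by name: the statement is the Claim_ definition above) =====
theorem rankForgun_spec : Claim_equal_rankForgun := by
  intro g _
  unfold Spec_rankForgun rankForgun rankForgun_alt
  rw [fuse g _ (fun r hr => ((PySem.List.mem_pyRange_one).mp hr).1) []]
  simp [findPossA, Option.orElse]
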